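-- pv_equiv track=rewrite | github.com/rslabon/aoc2019 | day10.py | detect_asteroids
-- ===== SOURCE A (Python) =====
-- def gcd(a, b):
--     while b:
--         a, b = b, a % b
--     return abs(a)
--
-- def step(a, b):
--     g = gcd(abs(a), abs(b))
--     return a // g, b // g
--
-- def find_blocked_asteroids(sx, sy, ax, ay, xmax, ymax):
--     dx, dy = ax - sx, ay - sy
--     step_x, step_y = step(dx, dy)
--     points = []
--     x, y = ax, ay
--     while 0 <= x <= xmax and 0 <= y <= ymax:
--         points.append((x, y))
--         x += step_x
--         y += step_y
--
--     return set(points[1:])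
--
-- def find_asteroids(grid):
--     width = len(grid[0])
--     height = len(grid)
--     asteroids = set()
--     for y in range(height):
--         for x in range(width):
--             if grid[y][x] == "#":
--                 asteroids.add((x, y))
--
--     return asteroids
--
-- def detect_asteroids(grid, station):
--     width = len(grid[0])
--     height = len(grid)
--     asteroids = find_asteroids(grid) - {station}
--
--     sx, sy = station
--     total_blocked = set()
--     for (ax, ay) in asteroids:
--         blocked_asteroids = find_blocked_asteroids(sx, sy, ax, ay, width, height)
--         total_blocked = total_blocked | blocked_asteroids
--
--     return len(asteroids - total_blocked - {station})
-- ===== SOURCE B (Python) =====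
-- def _gcd(a, b):
--     return a if b == 0 else _gcd(b, a % b)
--
-- def detect_asteroids(grid, station):
--     width = len(grid[0])
--     sx, sy = station
--     dirs = set()
--     for y, row in enumerate(grid):
--         for x in range(width):
--             if row[x] == "#" and (x, y) != (sx, sy):
--                 dx, dy = x - sx, y - sy
--                 g = _gcd(abs(dx), abs(dy))
--                 dirs.add((dx // g, dy // g))
--     return len(dirs)
-- ===== Notes on version B (the rewrite author's own statement) =====
-- stated objective: alternative
-- what changed: A walks, for every asteroid, the whole ray of lattice points behind it and collects them into a blocked set before counting the survivors; B instead counts the distinct gcd-reduced direction vectors (dx//g, dy//g) from the station in a single pass over the grid.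
import Mathlib
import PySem

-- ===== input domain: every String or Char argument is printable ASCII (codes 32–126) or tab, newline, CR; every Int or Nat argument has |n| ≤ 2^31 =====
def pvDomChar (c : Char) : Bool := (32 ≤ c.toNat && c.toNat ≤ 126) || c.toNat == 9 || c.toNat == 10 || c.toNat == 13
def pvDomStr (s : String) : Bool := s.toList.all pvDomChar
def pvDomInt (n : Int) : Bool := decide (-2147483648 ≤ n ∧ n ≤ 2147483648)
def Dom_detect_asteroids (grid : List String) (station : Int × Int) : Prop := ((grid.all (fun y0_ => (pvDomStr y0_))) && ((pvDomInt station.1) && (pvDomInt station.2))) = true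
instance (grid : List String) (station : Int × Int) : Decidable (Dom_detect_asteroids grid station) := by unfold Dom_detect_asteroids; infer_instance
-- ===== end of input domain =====

-- B replaces A's per-asteroid blocked-ray walk by counting distinct gcd-reduced
-- direction vectors from the station in one pass over the grid; equality of the
-- return values is proved on every input where Python A returns (Pre_ below
-- excludes exactly its IndexError inputs).

-- termination fact for the two gcd loops (cited by their decreasing_by)
theorem pvModNatAbsLt (a b : Int) (hb : b ≠ 0) :
    (PySem.Int.mod a b).natAbs < b.natAbs := by
  rcases lt_or_gt_of_ne hb with h | h
  · have := PySem.Int.mod_neg_bounds a h; omega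
  · have h1 := PySem.Int.mod_nonneg a h
    have h2 := PySem.Int.mod_lt a h
    omega

-- ===== PORT A =====
-- def gcd(a, b): while b: a, b = b, a % b; return abs(a)
def pyGcd (a b : Int) : Int :=
  if hb : b = 0 then (a.natAbs : Int)
  else pyGcd b (PySem.Int.mod a b)
termination_by b.natAbs
decreasing_by exact pvModNatAbsLt a b hb

-- def step(a, b)
def stepA (a b : Int) : Int × Int :=
  let g := pyGcd (a.natAbs : Int) (b.natAbs : Int)
  (PySem.Int.floordiv a g, PySem.Int.floordiv b g)

-- the while loop of find_blocked_asteroids (fuel bounds the iteration count;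
-- membership lemmas below need no exact fuel value)
def walkA (xmax ymax ux uy : Int) : Nat → Int → Int → List (Int × Int)
  | 0, _, _ => []
  | f + 1, x, y =>
      if 0 ≤ x ∧ x ≤ xmax ∧ 0 ≤ y ∧ y ≤ ymax then
        (x, y) :: walkA xmax ymax ux uy f (x + ux) (y + uy)
      else []

-- def find_blocked_asteroids(sx, sy, ax, ay, xmax, ymax)
def find_blocked_asteroids (sx sy ax ay xmax ymax : Int) : PySem.Set (Int × Int) :=
  let dx := ax - sx
  let dy := ay - sy
  let s := stepA dx dy
  let points := walkA xmax ymax s.1 s.2 (xmax.toNat + ymax.toNat + 2) ax ay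
  PySem.Set.ofList (PySem.List.slice points (some 1) none)

-- def find_asteroids(grid)
def find_asteroids (grid : List String) : PySem.Set (Int × Int) :=
  let width := PySem.Str.len (PySem.List.pyGetD grid 0 "")
  let height := (grid.length : Int)
  (PySem.List.pyRange 0 height 1).foldl (fun ast y =>
    (PySem.List.pyRange 0 width 1).foldl (fun ast x =>
      if PySem.Str.pyGet? (PySem.List.pyGetD grid y "") x = some '#' then
        PySem.Set.add ast (x, y)
      else ast) ast) PySem.Set.empty

-- def detect_asteroids(grid, station)
def detect_asteroids (grid : List String) (station : Int × Int) : Int :=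
  let width := PySem.Str.len (PySem.List.pyGetD grid 0 "")
  let height := (grid.length : Int)
  let asteroids := PySem.Set.diff (find_asteroids grid) [station]
  let sx := station.1
  let sy := station.2
  let total_blocked := asteroids.foldl (fun tb a =>
    PySem.Set.union tb (find_blocked_asteroids sx sy a.1 a.2 width height)) PySem.Set.empty
  PySem.Set.len (PySem.Set.diff (PySem.Set.diff asteroids total_blocked) [station])

-- ===== PORT B =====
-- def _gcd(a, b): return a if b == 0 else _gcd(b, a % b)
def bGcd (a b : Int) : Int :=
  if hb : b = 0 then a
  else bGcd b (PySem.Int.mod a b)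
termination_by b.natAbs
decreasing_by exact pvModNatAbsLt a b hb

def detect_asteroids_alt (grid : List String) (station : Int × Int) : Int :=
  let width := PySem.Str.len (PySem.List.pyGetD grid 0 "")
  let sx := station.1
  let sy := station.2
  let dirs := (PySem.List.enumerate grid).foldl (fun dirs yr =>
    (PySem.List.pyRange 0 width 1).foldl (fun dirs x =>
      if PySem.Str.pyGet? yr.2 x = some '#' ∧ (x, yr.1) ≠ (sx, sy) then
        let dx := x - sx
        let dy := yr.1 - sy
        let g := bGcd (dx.natAbs : Int) (dy.natAbs : Int)
        PySem.Set.add dirs (PySem.Int.floordiv dx g, PySem.Int.floordiv dy g)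
      else dirs) dirs) PySem.Set.empty
  PySem.Set.len dirs

-- ===== PRECONDITION & SPEC =====
-- Pre_ excludes exactly the inputs on which Python A raises IndexError: an empty
-- grid (grid[0]), or some row shorter than the first row (grid[y][x], x < len(grid[0])).
def Pre_detect_asteroids (grid : List String) (station : Int × Int) : Prop :=
  grid ≠ [] ∧ ∀ s ∈ grid, PySem.Str.len (PySem.List.pyGetD grid 0 "") ≤ PySem.Str.len s
instance (grid : List String) (station : Int × Int) : Decidable (Pre_detect_asteroids grid station) := by
  unfold Pre_detect_asteroids; infer_instance

def pvWitness_detect_asteroids : List String × (Int × Int) := (["#.#", ".#."], (0, 0))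

def Spec_detect_asteroids (grid : List String) (station : Int × Int) (out : Int) : Prop := out = detect_asteroids_alt grid station
instance (grid : List String) (station : Int × Int) (out : Int) : Decidable (Spec_detect_asteroids grid station out) := by unfold Spec_detect_asteroids; infer_instance

-- ===== CLAIM (what is proved, stated in full; the proofs are below) =====
def Claim_equal_detect_asteroids : Prop := ∀ (grid : List String) (station : Int × Int), Dom_detect_asteroids grid station → Pre_detect_asteroids grid station → Spec_detect_asteroids grid station (detect_asteroids grid station)

-- ===== LEMMAS AND PROOFS =====

theorem gcd_mod_aux (a b : Int) : Int.gcd b (PySem.Int.mod a b) = Int.gcd a b := by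
  have h := PySem.Int.floordiv_mul_add_mod a b
  have h2 : PySem.Int.mod a b = a + b * (-(PySem.Int.floordiv a b)) := by linarith
  rw [h2, Int.gcd_add_mul_left_right, Int.gcd_comm]

theorem pyGcd_eq_aux (n : Nat) : ∀ a b : Int, b.natAbs ≤ n → pyGcd a b = (Int.gcd a b : Int) := by
  induction n with
  | zero =>
    intro a b hb
    have : b = 0 := by omega
    subst this
    rw [pyGcd]
    simp [Int.gcd]
  | succ n ih =>
    intro a b hb
    rw [pyGcd]
    by_cases h : b = 0
    · subst h; simp [Int.gcd]
    · simp only [h, dif_neg, not_false_iff]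
      rw [ih b (PySem.Int.mod a b) (by have := pvModNatAbsLt a b h; omega)]
      rw [gcd_mod_aux]

theorem pyGcd_eq (a b : Int) : pyGcd a b = (Int.gcd a b : Int) :=
  pyGcd_eq_aux b.natAbs a b le_rfl

theorem bGcd_eq_aux (n : Nat) : ∀ a b : Int, b.natAbs ≤ n → 0 ≤ a → 0 ≤ b →
    bGcd a b = (Int.gcd a b : Int) := by
  induction n with
  | zero =>
    intro a b hb ha _
    have : b = 0 := by omega
    subst this
    rw [bGcd]
    simp [Int.gcd, Int.natAbs_of_nonneg ha]
  | succ n ih =>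
    intro a b hb ha hb0
    rw [bGcd]
    by_cases h : b = 0
    · subst h; simp [Int.gcd, Int.natAbs_of_nonneg ha]
    · simp only [h, dif_neg, not_false_iff]
      have hbpos : 0 < b := lt_of_le_of_ne hb0 (Ne.symm h)
      rw [ih b (PySem.Int.mod a b) (by have := pvModNatAbsLt a b h; omega) hb0
            (PySem.Int.mod_nonneg a hbpos)]
      rw [gcd_mod_aux]

theorem bGcd_eq (a b : Int) (ha : 0 ≤ a) (hb : 0 ≤ b) : bGcd a b = (Int.gcd a b : Int) :=
  bGcd_eq_aux b.natAbs a b le_rfl ha hb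

theorem walk_sound (xmax ymax ux uy : Int) (f : Nat) :
    ∀ (x y : Int) (p : Int × Int), p ∈ walkA xmax ymax ux uy f x y →
    ∃ k : Nat, p = (x + k * ux, y + k * uy) := by
  induction f with
  | zero => intro x y p hp; simp [walkA] at hp
  | succ f ih =>
    intro x y p hp
    rw [walkA] at hp
    split_ifs at hp with h
    · rcases List.mem_cons.mp hp with h1 | h1
      · exact ⟨0, by simpa using h1⟩
      · obtain ⟨k, hk⟩ := ih (x + ux) (y + uy) p h1
        refine ⟨k + 1, ?_⟩
        rw [hk]
        push_cast
        refine Prod.ext ?_ ?_ <;> simp <;> ring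
    · simp at hp

theorem walk_complete (xmax ymax ux uy : Int) (f : Nat) :
    ∀ (x y : Int) (k : Nat), k < f →
    (∀ j : Nat, j ≤ k → 0 ≤ x + j * ux ∧ x + j * ux ≤ xmax ∧ 0 ≤ y + j * uy ∧ y + j * uy ≤ ymax) →
    (x + k * ux, y + k * uy) ∈ walkA xmax ymax ux uy f x y := by
  induction f with
  | zero => intro x y k hk; omega
  | succ f ih =>
    intro x y k hk hbox
    rw [walkA]
    have h0 := hbox 0 (Nat.zero_le _)
    simp only [Nat.cast_zero, zero_mul, add_zero] at h0
    rw [if_pos h0]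
    cases k with
    | zero => simp
    | succ k =>
      refine List.mem_cons_of_mem _ ?_
      have := ih (x + ux) (y + uy) k (by omega) (fun j hj => by
        have := hbox (j + 1) (by omega)
        push_cast at this ⊢
        constructor
        · linarith [this.1]
        constructor
        · linarith [this.2.1]
        constructor
        · linarith [this.2.2.1]
        · linarith [this.2.2.2])
      have harr : x + ux + (k : Int) * ux = x + ((k : Nat) + 1 : Nat) * ux := by push_cast; ring
      have harr2 : y + uy + (k : Int) * uy = y + ((k : Nat) + 1 : Nat) * uy := by push_cast; ring
      rw [harr, harr2] at this
      exact this

theorem mem_foldl_set {α ι : Type} [BEq α] (l : List ι) (F : PySem.Set α → ι → PySem.Set α)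
    (Q : ι → α → Prop)
    (hF : ∀ s i p, p ∈ F s i ↔ p ∈ s ∨ Q i p) :
    ∀ (s0 : PySem.Set α) (p : α), p ∈ l.foldl F s0 ↔ p ∈ s0 ∨ ∃ i ∈ l, Q i p := by
  induction l with
  | nil => intro s0 p; simp
  | cons i l ih =>
    intro s0 p
    simp only [List.foldl_cons, List.mem_cons]
    rw [ih (F s0 i) p, hF s0 i p]
    constructor
    · rintro ((h | h) | ⟨j, hj, hq⟩)
      · exact Or.inl h
      · exact Or.inr ⟨i, Or.inl rfl, h⟩
      · exact Or.inr ⟨j, Or.inr hj, hq⟩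
    · rintro (h | ⟨j, (rfl | hj), hq⟩)
      · exact Or.inl (Or.inl h)
      · exact Or.inl (Or.inr hq)
      · exact Or.inr ⟨j, hj, hq⟩

theorem nodup_foldl_set {α ι : Type} (l : List ι) (F : PySem.Set α → ι → PySem.Set α)
    (hF : ∀ s i, List.Nodup s → List.Nodup (F s i)) :
    ∀ (s0 : PySem.Set α), List.Nodup s0 → List.Nodup (l.foldl F s0) := by
  induction l with
  | nil => intro s0 h; simpa using h
  | cons i l ih => intro s0 h; exact ih (F s0 i) (hF s0 i h)

def gnF (st p : Int × Int) : Nat := Int.gcd (p.1 - st.1) (p.2 - st.2)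

def dirF (st p : Int × Int) : Int × Int :=
  ((p.1 - st.1) / (gnF st p : Int), (p.2 - st.2) / (gnF st p : Int))

theorem gnF_pos (st p : Int × Int) (h : p ≠ st) : 0 < gnF st p := by
  rcases Nat.eq_zero_or_pos (gnF st p) with h0 | h0
  · exfalso
    rw [gnF, Int.gcd_eq_zero_iff] at h0
    exact h (Prod.ext (by omega) (by omega))
  · exact h0

theorem decompF (st p : Int × Int) (h : p ≠ st) :
    p.1 - st.1 = (gnF st p : Int) * (dirF st p).1 ∧
    p.2 - st.2 = (gnF st p : Int) * (dirF st p).2 := by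
  constructor
  · rw [dirF]
    simp only [gnF]
    rw [mul_comm, Int.ediv_mul_cancel (Int.gcd_dvd_left _ _)]
  · rw [dirF]
    simp only [gnF]
    rw [mul_comm, Int.ediv_mul_cancel (Int.gcd_dvd_right _ _)]

theorem primF (st p : Int × Int) (h : p ≠ st) :
    Int.gcd (dirF st p).1 (dirF st p).2 = 1 := by
  have := gnF_pos st p h
  rw [dirF]; simp only [gnF] at this ⊢; exact Int.gcd_div_gcd_div_gcd this

theorem scaledF (st q : Int × Int) (m u1 u2 : Int) (hm : 0 < m)
    (hu : Int.gcd u1 u2 = 1)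
    (h1 : q.1 - st.1 = m * u1) (h2 : q.2 - st.2 = m * u2) :
    ((gnF st q : Int) = m ∧ dirF st q = (u1, u2)) := by
  have hg : (gnF st q : Int) = m := by
    rw [gnF, h1, h2, Int.gcd_mul_left, hu]
    simp [Int.natAbs_of_nonneg hm.le]
  refine ⟨hg, ?_⟩
  rw [dirF, hg, h1, h2, Int.mul_ediv_cancel_left _ hm.ne', Int.mul_ediv_cancel_left _ hm.ne']

theorem eq_of_dir_gn (st a b : Int × Int) (ha : a ≠ st) (hb : b ≠ st)
    (hd : dirF st a = dirF st b) (hg : gnF st a = gnF st b) : a = b := by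
  have da := decompF st a ha
  have db := decompF st b hb
  rw [hd, hg] at da
  exact Prod.ext (by omega) (by omega)

theorem betweenF (c u X : Int) (i m : Int) (h0i : 0 ≤ i) (him : i ≤ m)
    (h0 : 0 ≤ c) (hX : c ≤ X) (h0' : 0 ≤ c + m * u) (hX' : c + m * u ≤ X) :
    0 ≤ c + i * u ∧ c + i * u ≤ X := by
  rcases le_or_gt 0 u with hu | hu
  · have h1 : i * u ≤ m * u := mul_le_mul_of_nonneg_right him hu
    have h2 : 0 ≤ i * u := mul_nonneg h0i hu
    constructor <;> linarith
  · have h1 : m * u ≤ i * u := by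
      apply mul_le_mul_of_nonpos_right him hu.le
    have h2 : i * u ≤ 0 := mul_nonpos_of_nonneg_of_nonpos h0i hu.le
    constructor <;> linarith

theorem stepA_eq (st p : Int × Int) (h : p ≠ st) :
    stepA (p.1 - st.1) (p.2 - st.2) = dirF st p := by
  have hg : pyGcd ((p.1 - st.1).natAbs : Int) ((p.2 - st.2).natAbs : Int) = (gnF st p : Int) := by
    rw [pyGcd_eq]
    simp [Int.gcd, gnF, Int.natAbs_abs]
  have hpos : (0 : Int) < (gnF st p : Int) := by exact_mod_cast gnF_pos st p h
  rw [stepA]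
  simp only [hg]
  rw [dirF, PySem.Int.floordiv_eq_ediv_of_pos hpos, PySem.Int.floordiv_eq_ediv_of_pos hpos]

theorem blocked_iff (st a b : Int × Int) (xmax ymax : Int)
    (ha1 : 0 ≤ a.1) (ha1' : a.1 ≤ xmax) (ha2 : 0 ≤ a.2) (ha2' : a.2 ≤ ymax)
    (hb1 : 0 ≤ b.1) (hb1' : b.1 ≤ xmax) (hb2 : 0 ≤ b.2) (hb2' : b.2 ≤ ymax)
    (hane : a ≠ st) (hbne : b ≠ st) :
    b ∈ find_blocked_asteroids st.1 st.2 a.1 a.2 xmax ymax ↔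
      (dirF st b = dirF st a ∧ gnF st a < gnF st b) := by
  have hx : 0 ≤ xmax := le_trans ha1 ha1'
  have hy : 0 ≤ ymax := le_trans ha2 ha2'
  rw [find_blocked_asteroids]
  simp only [stepA_eq st a hane]
  set u1 := (dirF st a).1 with hu1def
  set u2 := (dirF st a).2 with hu2def
  set g := gnF st a with hgdef
  have hgpos : 0 < g := gnF_pos st a hane
  have hda := decompF st a hane
  have hprim : Int.gcd u1 u2 = 1 := primF st a hane
  have hN : xmax.toNat + ymax.toNat + 2 = (xmax.toNat + ymax.toNat + 1) + 1 := rfl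
  rw [hN, walkA, if_pos ⟨ha1, ha1', ha2, ha2'⟩]
  rw [PySem.List.slice_from_one]
  simp only [List.tail_cons]
  rw [PySem.Set.mem_ofList]
  constructor
  · intro hmem
    obtain ⟨k, hk⟩ := walk_sound xmax ymax u1 u2 _ _ _ _ hmem
    have hfst : b.1 = a.1 + u1 + (k : Int) * u1 := by rw [hk]
    have hsnd : b.2 = a.2 + u2 + (k : Int) * u2 := by rw [hk]
    have hb1e : b.1 - st.1 = ((g : Int) + k + 1) * u1 := by linear_combination hfst + hda.1
    have hb2e : b.2 - st.2 = ((g : Int) + k + 1) * u2 := by linear_combination hsnd + hda.2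
    have hm : (0 : Int) < (g : Int) + k + 1 := by positivity
    obtain ⟨hgb, hdb⟩ := scaledF st b ((g : Int) + k + 1) u1 u2 hm hprim hb1e hb2e
    constructor
    · rw [hdb, hu1def, hu2def]
    · omega
  · rintro ⟨hd, hg⟩
    set m : Int := (gnF st b : Int) - (g : Int) with hmdef
    have hm : 0 < m := by simp [hmdef]; exact_mod_cast hg
    have hdb := decompF st b hbne
    rw [hd] at hdb
    have hbe1 : b.1 = a.1 + m * u1 := by
      rw [hmdef]
      linear_combination hdb.1 - hda.1
    have hbe2 : b.2 = a.2 + m * u2 := by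
      rw [hmdef]
      linear_combination hdb.2 - hda.2
    -- bound m by the box size
    have hmbound : m ≤ xmax + ymax := by
      have hune : u1 ≠ 0 ∨ u2 ≠ 0 := by
        by_contra hc
        push Not at hc
        rw [hc.1, hc.2] at hprim
        simp [Int.gcd] at hprim
      have hcase1 : u1 ≠ 0 → m ≤ xmax := by
        intro h1
        rcases le_or_gt 1 u1 with hp | hp
        · nlinarith
        · have : u1 ≤ -1 := by omega
          nlinarith
      have hcase2 : u2 ≠ 0 → m ≤ ymax := by
        intro h2
        rcases le_or_gt 1 u2 with hp | hp
        · nlinarith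
        · have : u2 ≤ -1 := by omega
          nlinarith
      rcases hune with h | h
      · have := hcase1 h; omega
      · have := hcase2 h; omega
    have hkey := walk_complete xmax ymax u1 u2 (xmax.toNat + ymax.toNat + 1)
      (a.1 + u1) (a.2 + u2) (m - 1).toNat (by omega)
      (by
        intro j hj
        have hj1 : (0 : Int) ≤ (j : Int) + 1 := by positivity
        have hj2 : (j : Int) + 1 ≤ m := by omega
        have e1 : a.1 + u1 + (j : Int) * u1 = a.1 + ((j : Int) + 1) * u1 := by ring
        have e2 : a.2 + u2 + (j : Int) * u2 = a.2 + ((j : Int) + 1) * u2 := by ring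
        rw [e1, e2]
        have c1 := betweenF a.1 u1 xmax ((j : Int) + 1) m hj1 hj2 ha1 ha1'
          (by rw [← hbe1]; exact hb1) (by rw [← hbe1]; exact hb1')
        have c2 := betweenF a.2 u2 ymax ((j : Int) + 1) m hj1 hj2 ha2 ha2'
          (by rw [← hbe2]; exact hb2) (by rw [← hbe2]; exact hb2')
        exact ⟨c1.1, c1.2, c2.1, c2.2⟩)
    have heq : (a.1 + u1 + ((m - 1).toNat : Int) * u1, a.2 + u2 + ((m - 1).toNat : Int) * u2) = b := by
      have ht : ((m - 1).toNat : Int) = m - 1 := by omega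
      rw [ht]
      refine Prod.ext ?_ ?_
      · show a.1 + u1 + (m - 1) * u1 = b.1
        rw [hbe1]; ring
      · show a.2 + u2 + (m - 1) * u2 = b.2
        rw [hbe2]; ring
    rw [heq] at hkey
    exact hkey

def goodCell (grid : List String) (st : Int × Int) (p : Int × Int) : Prop :=
  0 ≤ p.1 ∧ p.1 < PySem.Str.len (PySem.List.pyGetD grid 0 "") ∧
  0 ≤ p.2 ∧ p.2 < (grid.length : Int) ∧
  PySem.Str.pyGet? (PySem.List.pyGetD grid p.2 "") p.1 = some '#' ∧ p ≠ st

theorem mem_find_asteroids (grid : List String) (p : Int × Int) :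
    p ∈ find_asteroids grid ↔
      (0 ≤ p.1 ∧ p.1 < PySem.Str.len (PySem.List.pyGetD grid 0 "") ∧
       0 ≤ p.2 ∧ p.2 < (grid.length : Int) ∧
       PySem.Str.pyGet? (PySem.List.pyGetD grid p.2 "") p.1 = some '#') := by
  rw [find_asteroids]
  rw [mem_foldl_set _ _
    (fun y q => ∃ x : Int, (0 ≤ x ∧ x < PySem.Str.len (PySem.List.pyGetD grid 0 "")) ∧
      PySem.Str.pyGet? (PySem.List.pyGetD grid y "") x = some '#' ∧ q = (x, y))
    (by
      intro s y q
      rw [mem_foldl_set _ _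
        (fun x q => PySem.Str.pyGet? (PySem.List.pyGetD grid y "") x = some '#' ∧ q = (x, y))
        (by
          intro s' x q'
          by_cases h : PySem.Str.pyGet? (PySem.List.pyGetD grid y "") x = some '#'
          · rw [if_pos h, PySem.Set.mem_add]
            tauto
          · rw [if_neg h]
            tauto)]
      simp only [PySem.List.mem_pyRange_one])]
  simp only [PySem.Set.empty, List.not_mem_nil, false_or, PySem.List.mem_pyRange_one]
  constructor
  · rintro ⟨y, ⟨hy0, hyH⟩, x, ⟨hx0, hxW⟩, hc, rfl⟩
    exact ⟨hx0, hxW, hy0, hyH, hc⟩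
  · rintro ⟨hx0, hxW, hy0, hyH, hc⟩
    exact ⟨p.2, ⟨hy0, hyH⟩, p.1, ⟨hx0, hxW⟩, hc, rfl⟩

theorem nodup_find_asteroids (grid : List String) : (find_asteroids grid).Nodup := by
  rw [find_asteroids]
  refine nodup_foldl_set _ _ ?_ _ (by simp [PySem.Set.empty])
  intro s y hs
  refine nodup_foldl_set _ _ ?_ _ hs
  intro s' x hs'
  by_cases h : PySem.Str.pyGet? (PySem.List.pyGetD grid y "") x = some '#'
  · rw [if_pos h]
    exact PySem.Set.nodup_add _ _ hs'
  · rw [if_neg h]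
    exact hs'

theorem mem_ast (grid : List String) (st : Int × Int) (p : Int × Int) :
    p ∈ PySem.Set.diff (find_asteroids grid) [st] ↔ goodCell grid st p := by
  rw [PySem.Set.mem_diff, mem_find_asteroids, goodCell]
  simp only [List.mem_singleton]
  tauto

theorem mem_tb (W H sx sy : Int) (ast : PySem.Set (Int × Int)) (p : Int × Int) :
    p ∈ ast.foldl (fun tb a =>
        PySem.Set.union tb (find_blocked_asteroids sx sy a.1 a.2 W H)) PySem.Set.empty ↔
      ∃ a ∈ ast, p ∈ find_blocked_asteroids sx sy a.1 a.2 W H := by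
  rw [mem_foldl_set _ _ (fun a q => q ∈ find_blocked_asteroids sx sy a.1 a.2 W H)
    (by intro s a q; exact PySem.Set.mem_union s _ q)]
  simp [PySem.Set.empty]

theorem pyGetD_str_toNat (grid : List String) (i : Int) (h0 : 0 ≤ i) (h : i.toNat < grid.length) :
    PySem.List.pyGetD grid i "" = grid[i.toNat] := by
  lift i to Nat using h0
  rw [PySem.List.pyGetD_natCast]
  simp only [Int.toNat_natCast] at h ⊢
  rw [List.getD_eq_getElem _ _ h]

theorem dirB_eq (sx sy x y : Int) (h : (x, y) ≠ (sx, sy)) :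
    (PySem.Int.floordiv (x - sx) (bGcd ((x - sx).natAbs : Int) ((y - sy).natAbs : Int)),
     PySem.Int.floordiv (y - sy) (bGcd ((x - sx).natAbs : Int) ((y - sy).natAbs : Int))) =
    dirF (sx, sy) (x, y) := by
  have hb : bGcd ((x - sx).natAbs : Int) ((y - sy).natAbs : Int) = (gnF (sx, sy) (x, y) : Int) := by
    rw [bGcd_eq _ _ (by positivity) (by positivity)]
    simp [Int.gcd, gnF, Int.natAbs_abs]
  have hpos : (0 : Int) < (gnF (sx, sy) (x, y) : Int) := by
    exact_mod_cast gnF_pos (sx, sy) (x, y) h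
  rw [hb, PySem.Int.floordiv_eq_ediv_of_pos hpos, PySem.Int.floordiv_eq_ediv_of_pos hpos]
  rw [dirF]

theorem mem_dirsB (grid : List String) (sx sy : Int) (u : Int × Int) :
    u ∈ (PySem.List.enumerate grid).foldl (fun dirs yr =>
        (PySem.List.pyRange 0 (PySem.Str.len (PySem.List.pyGetD grid 0 "")) 1).foldl (fun dirs x =>
          if PySem.Str.pyGet? yr.2 x = some '#' ∧ (x, yr.1) ≠ (sx, sy) then
            PySem.Set.add dirs
              (PySem.Int.floordiv (x - sx) (bGcd ((x - sx).natAbs : Int) ((yr.1 - sy).natAbs : Int)),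
               PySem.Int.floordiv (yr.1 - sy) (bGcd ((x - sx).natAbs : Int) ((yr.1 - sy).natAbs : Int)))
          else dirs) dirs) PySem.Set.empty ↔
      ∃ p : Int × Int, goodCell grid (sx, sy) p ∧ u = dirF (sx, sy) p := by
  rw [mem_foldl_set _ _
    (fun yr q => ∃ x : Int, (0 ≤ x ∧ x < PySem.Str.len (PySem.List.pyGetD grid 0 "")) ∧
      PySem.Str.pyGet? yr.2 x = some '#' ∧ (x, yr.1) ≠ (sx, sy) ∧
      q = dirF (sx, sy) (x, yr.1))
    (by
      intro s yr q
      rw [mem_foldl_set _ _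
        (fun x q => PySem.Str.pyGet? yr.2 x = some '#' ∧ (x, yr.1) ≠ (sx, sy) ∧
          q = dirF (sx, sy) (x, yr.1))
        (by
          intro s' x q'
          by_cases h : PySem.Str.pyGet? yr.2 x = some '#' ∧ (x, yr.1) ≠ (sx, sy)
          · rw [if_pos h, PySem.Set.mem_add, dirB_eq sx sy x yr.1 h.2]
            tauto
          · rw [if_neg h]
            tauto)]
      simp only [PySem.List.mem_pyRange_one])]
  simp only [PySem.Set.empty, List.not_mem_nil, false_or]
  constructor
  · rintro ⟨yr, hyr, x, ⟨hx0, hxW⟩, hc, hne, rfl⟩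
    rw [PySem.List.mem_enumerate_iff] at hyr
    obtain ⟨k, hk, rfl⟩ := hyr
    refine ⟨(x, (0 : Int) + (k : Int)), ⟨hx0, hxW, by omega, by push_cast; omega, ?_, ?_⟩, rfl⟩
    · have hgd : PySem.List.pyGetD grid ((0 : Int) + (k : Int)) "" = grid[((0 : Int) + (k : Int)).toNat] := by
        refine pyGetD_str_toNat grid _ (by omega) (by omega)
      rw [hgd]
      have : ((0 : Int) + (k : Int)).toNat = k := by omega
      simp only [this]
      exact hc
    · exact hne
  · rintro ⟨p, ⟨hx0, hxW, hy0, hyH, hc, hne⟩, rfl⟩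
    have hk : p.2.toNat < grid.length := by omega
    refine ⟨(p.2, grid[p.2.toNat]), ?_, p.1, ⟨hx0, hxW⟩, ?_, ?_, ?_⟩
    · rw [PySem.List.mem_enumerate_iff]
      exact ⟨p.2.toNat, hk, by simp; omega⟩
    · rw [← pyGetD_str_toNat grid p.2 hy0 hk]
      exact hc
    · simpa using hne
    · simp

theorem nodup_dirsB (grid : List String) (sx sy : Int) :
    ((PySem.List.enumerate grid).foldl (fun dirs yr =>
        (PySem.List.pyRange 0 (PySem.Str.len (PySem.List.pyGetD grid 0 "")) 1).foldl (fun dirs x =>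
          if PySem.Str.pyGet? yr.2 x = some '#' ∧ (x, yr.1) ≠ (sx, sy) then
            PySem.Set.add dirs
              (PySem.Int.floordiv (x - sx) (bGcd ((x - sx).natAbs : Int) ((yr.1 - sy).natAbs : Int)),
               PySem.Int.floordiv (yr.1 - sy) (bGcd ((x - sx).natAbs : Int) ((yr.1 - sy).natAbs : Int)))
          else dirs) dirs) PySem.Set.empty : List (Int × Int)).Nodup := by
  refine nodup_foldl_set _ _ ?_ _ (by simp [PySem.Set.empty])
  intro s yr hs
  refine nodup_foldl_set _ _ ?_ _ hs
  intro s' x hs'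
  by_cases h : PySem.Str.pyGet? yr.2 x = some '#' ∧ (x, yr.1) ≠ (sx, sy)
  · rw [if_pos h]
    exact PySem.Set.nodup_add _ _ hs'
  · rw [if_neg h]
    exact hs'

theorem main_eq (grid : List String) (station : Int × Int) :
    detect_asteroids grid station = detect_asteroids_alt grid station := by
  have hast0 : ∀ p, p ∈ PySem.Set.diff (find_asteroids grid) [station] ↔
      goodCell grid station p := fun p => mem_ast grid station p
  set W := PySem.Str.len (PySem.List.pyGetD grid 0 "") with hW
  set H := (grid.length : Int) with hH
  set ast := PySem.Set.diff (find_asteroids grid) [station] with hastdef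
  set tb := ast.foldl (fun tb a =>
    PySem.Set.union tb (find_blocked_asteroids station.1 station.2 a.1 a.2 W H))
    PySem.Set.empty with htbdef
  set dirs := (PySem.List.enumerate grid).foldl (fun dirs yr =>
    (PySem.List.pyRange 0 W 1).foldl (fun dirs x =>
      if PySem.Str.pyGet? yr.2 x = some '#' ∧ (x, yr.1) ≠ (station.1, station.2) then
        PySem.Set.add dirs
          (PySem.Int.floordiv (x - station.1)
            (bGcd (((x - station.1).natAbs : Int)) (((yr.1 - station.2).natAbs : Int))),
           PySem.Int.floordiv (yr.1 - station.2)
            (bGcd (((x - station.1).natAbs : Int)) (((yr.1 - station.2).natAbs : Int))))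
      else dirs) dirs) PySem.Set.empty with hdirsdef
  set Dfin := PySem.Set.diff (PySem.Set.diff ast tb) [station] with hDdef
  have hA : detect_asteroids grid station = PySem.Set.len Dfin := rfl
  have hB : detect_asteroids_alt grid station = PySem.Set.len dirs := rfl
  rw [hA, hB]
  -- membership and nodup facts
  have hastnd : ast.Nodup := PySem.Set.nodup_diff _ _ (nodup_find_asteroids grid)
  have htbm : ∀ p, p ∈ tb ↔
      ∃ a ∈ ast, p ∈ find_blocked_asteroids station.1 station.2 a.1 a.2 W H :=
    fun p => mem_tb W H station.1 station.2 ast p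
  have hdirm : ∀ u, u ∈ dirs ↔ ∃ p, goodCell grid station p ∧ u = dirF station p := by
    intro u
    have h := mem_dirsB grid station.1 station.2 u
    simpa only [Prod.mk.eta, hdirsdef, hW] using h
  have hdirnd : dirs.Nodup := by
    have h := nodup_dirsB grid station.1 station.2
    simpa only [hdirsdef, hW] using h
  have hbl : ∀ a b : Int × Int, a ∈ ast → b ∈ ast →
      (b ∈ find_blocked_asteroids station.1 station.2 a.1 a.2 W H ↔
        (dirF station b = dirF station a ∧ gnF station a < gnF station b)) := by
    intro a b ha hb
    rw [hast0] at ha hb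
    obtain ⟨ha1, ha2, ha3, ha4, _, hane⟩ := ha
    obtain ⟨hb1, hb2, hb3, hb4, _, hbne⟩ := hb
    have := blocked_iff station a b W H ha1 (le_of_lt ha2) ha3 (le_of_lt ha4)
      hb1 (le_of_lt hb2) hb3 (le_of_lt hb4) hane hbne
    simpa using this
  have hDm : ∀ p, p ∈ Dfin ↔ (p ∈ ast ∧ p ∉ tb) := by
    intro p
    rw [hDdef, PySem.Set.mem_diff, PySem.Set.mem_diff]
    simp only [List.mem_singleton]
    constructor
    · rintro ⟨⟨h1, h2⟩, _⟩; exact ⟨h1, h2⟩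
    · rintro ⟨h1, h2⟩
      exact ⟨⟨h1, h2⟩, fun he => ((hast0 p).mp h1).2.2.2.2.2 he⟩
  have hDnd : Dfin.Nodup :=
    PySem.Set.nodup_diff _ _ (PySem.Set.nodup_diff _ _ hastnd)
  -- counting via Finsets
  have hcard1 : Dfin.toFinset.card = Dfin.length := List.toFinset_card_of_nodup hDnd
  have hcard2 : dirs.toFinset.card = dirs.length := List.toFinset_card_of_nodup hdirnd
  have himg : dirs.toFinset = Dfin.toFinset.image (dirF station) := by
    ext u
    simp only [List.mem_toFinset, Finset.mem_image]
    rw [hdirm u]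
    constructor
    · rintro ⟨a, hga, rfl⟩
      have haast : a ∈ ast := (hast0 a).mpr hga
      set T := ast.toFinset.filter (fun c => dirF station c = dirF station a) with hT
      have hTne : T.Nonempty := ⟨a, by simp [hT, List.mem_toFinset]; exact haast⟩
      obtain ⟨c, hcT, hcmin⟩ := Finset.exists_min_image T (fun c => gnF station c) hTne
      rw [hT, Finset.mem_filter, List.mem_toFinset] at hcT
      have hcast : c ∈ ast := hcT.1
      have hcnb : c ∉ tb := by
        intro hctb
        rw [htbm] at hctb
        obtain ⟨a', ha', hbl'⟩ := hctb
        rw [hbl a' c ha' hcast] at hbl'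
        have ha'T : a' ∈ T := by
          rw [hT, Finset.mem_filter, List.mem_toFinset]
          exact ⟨ha', by rw [← hbl'.1, hcT.2]⟩
        have := hcmin a' ha'T
        omega
      exact ⟨c, (hDm c).mpr ⟨hcast, hcnb⟩, hcT.2⟩
    · rintro ⟨c, hcD, rfl⟩
      have hc := (hDm c).mp hcD
      exact ⟨c, (hast0 c).mp hc.1, rfl⟩
  have hinj : Set.InjOn (dirF station) (Dfin.toFinset : Set (Int × Int)) := by
    intro aa haa bb hbb hdeq
    rw [Finset.mem_coe, List.mem_toFinset, hDm] at haa hbb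
    have haane : aa ≠ station := ((hast0 aa).mp haa.1).2.2.2.2.2
    have hbbne : bb ≠ station := ((hast0 bb).mp hbb.1).2.2.2.2.2
    rcases Nat.lt_trichotomy (gnF station aa) (gnF station bb) with hlt | heq | hgt
    · exfalso
      apply hbb.2
      rw [htbm]
      exact ⟨aa, haa.1, (hbl aa bb haa.1 hbb.1).mpr ⟨hdeq.symm, hlt⟩⟩
    · exact eq_of_dir_gn station aa bb haane hbbne hdeq heq
    · exfalso
      apply haa.2
      rw [htbm]
      exact ⟨bb, hbb.1, (hbl bb aa hbb.1 haa.1).mpr ⟨hdeq, hgt⟩⟩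
  have hcards : dirs.toFinset.card = Dfin.toFinset.card := by
    rw [himg]
    exact Finset.card_image_of_injOn hinj
  have hlen : Dfin.length = dirs.length := by omega
  show ((Dfin.length : Nat) : Int) = ((dirs.length : Nat) : Int)
  exact_mod_cast hlen

-- ===== VERDICT (by name: the statement is the Claim_ definition above) =====
theorem detect_asteroids_spec : Claim_equal_detect_asteroids := by
  unfold Claim_equal_detect_asteroids
  intro grid station _ _
  unfold Spec_detect_asteroids
  exact main_eq grid station
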